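-- pv_equiv track=rewrite | github.com/TakaIshikawa/graph | src/graph/adapters/ical.py | _unescape_text
-- ===== SOURCE A (Python) =====
-- def _unescape_text(text: str) -> str:
--     output: list[str] = []
--     index = 0
--     while index < len(text):
--         char = text[index]
--         if char == "\\" and index + 1 < len(text):
--             next_char = text[index + 1]
--             if next_char in {"n", "N"}:
--                 output.append("\n")
--             else:
--                 output.append(next_char)
--             index += 2
--             continue
--         output.append(char)
--         index += 1
--     return "".join(output)
-- ===== SOURCE B (Python) =====
-- def _unescape_text(text: str) -> str:
--     parts = text.split("\\")
--     output = [parts[0]]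
--     i = 1
--     while i < len(parts):
--         part = parts[i]
--         if part:
--             first = part[0]
--             output.append("\n" if first in {"n", "N"} else first)
--             output.append(part[1:])
--             i += 1
--         elif i + 1 < len(parts):
--             output.append("\\")
--             output.append(parts[i + 1])
--             i += 2
--         else:
--             output.append("\\")
--             i += 1
--     return "".join(output)
-- ===== Notes on version B (the rewrite author's own statement) =====
-- stated objective: faster
-- what changed: Instead of A's per-character index scan with one-character lookahead, B calls text.split('\\') once and reassembles the pieces: each later piece was preceded by a backslash, so its first character is decoded (n/N -> newline), and an empty piece means an escaped backslash (the following piece is copied verbatim) or a trailing lone backslash at the end.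
import Mathlib
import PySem

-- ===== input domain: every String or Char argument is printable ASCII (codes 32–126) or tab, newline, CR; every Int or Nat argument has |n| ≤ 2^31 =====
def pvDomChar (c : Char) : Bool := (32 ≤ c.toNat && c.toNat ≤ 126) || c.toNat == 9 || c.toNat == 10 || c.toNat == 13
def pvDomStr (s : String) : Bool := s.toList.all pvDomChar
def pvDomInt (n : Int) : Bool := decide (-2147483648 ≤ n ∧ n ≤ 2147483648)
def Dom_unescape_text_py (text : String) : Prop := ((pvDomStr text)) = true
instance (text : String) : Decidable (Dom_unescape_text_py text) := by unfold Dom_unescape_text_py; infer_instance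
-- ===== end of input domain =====

-- B replaces A's char-by-char lookahead scan by one split on backslash plus stitching the pieces back (decoding each piece's first character); same O(n), measurably faster in Python via the built-in split/join.


-- ===== PORT A =====
-- A's while loop reads text[index]; the guard 'index + 1 < len(text)' is the
-- lookahead on the next character, which is exactly the pattern match below.
def pvGoA : List Char → List Char
  | [] => []
  | [c] => [c]
  | c :: n :: rest =>
    if c = '\\' then
      (if n = 'n' ∨ n = 'N' then '\n' else n) :: pvGoA rest
    else
      c :: pvGoA (n :: rest)

def unescape_text_py (text : String) : String := String.ofList (pvGoA text.toList)

-- ===== PORT B =====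
-- Source B's while loop over parts[1:]: each part was preceded by one '\'.
-- A nonempty part has its first char decoded; an empty part means the escaped
-- char was itself a '\' (so the following part is copied verbatim, i += 2),
-- or a trailing lone '\' if the list ends.
def pvGoB : List (List Char) → List Char
  | [] => []
  | (c :: tl) :: rest => (if c = 'n' ∨ c = 'N' then '\n' else c) :: tl ++ pvGoB rest
  | [] :: q :: rest => '\\' :: q ++ pvGoB rest
  | [[]] => ['\\']

-- Source B: parts = text.split("\\") — PySem.Chars.splitOn is Python's str.split with a sep
def unescape_text_py_alt (text : String) : String :=
  match PySem.Chars.splitOn text.toList ['\\'] with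
  | [] => ""  -- split never returns [], unreachable
  | p0 :: rest => String.ofList (p0 ++ pvGoB rest)

-- ===== PRECONDITION & SPEC =====
def Spec_unescape_text_py (text : String) (out : String) : Prop := out = unescape_text_py_alt text
instance (text : String) (out : String) : Decidable (Spec_unescape_text_py text out) := by unfold Spec_unescape_text_py; infer_instance

-- ===== CLAIM (what is proved, stated in full; the proofs are below) =====
def Claim_equal_unescape_text_py : Prop := ∀ (text : String), Dom_unescape_text_py text → Spec_unescape_text_py text (unescape_text_py text)

-- ===== LEMMAS AND PROOFS =====
-- structural characterisation of split-on-'\': (first piece, remaining pieces)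
def pvSplit : List Char → List Char × List (List Char)
  | [] => ([], [])
  | c :: rest =>
    let p := pvSplit rest
    if c = '\\' then ([], p.1 :: p.2) else (c :: p.1, p.2)

theorem pvSplitOn_go (fuel : Nat) (l cur : List Char) (acc : List (List Char))
    (h : l.length < fuel) :
    PySem.Chars.splitOn.go ['\\'] fuel l cur acc
      = acc.reverse ++ (cur.reverse ++ (pvSplit l).1) :: (pvSplit l).2 := by
  induction fuel generalizing l cur acc with
  | zero => omega
  | succ fuel ih =>
    cases l with
    | nil => simp [PySem.Chars.splitOn.go, pvSplit]
    | cons c rest =>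
      by_cases hc : c = '\\'
      · subst hc
        simp only [PySem.Chars.splitOn.go, List.isPrefixOf, beq_self_eq_true, Bool.true_and,
          if_true, List.length_cons, List.drop_succ_cons, List.length_nil, List.drop_zero]
        rw [ih rest [] (cur.reverse :: acc) (by simpa using Nat.lt_of_succ_lt_succ h)]
        simp [pvSplit]
      · have hpre : (['\\'] : List Char).isPrefixOf (c :: rest) = false := by
          simp [List.isPrefixOf]; exact fun hh => (hc hh.symm).elim
        simp only [PySem.Chars.splitOn.go, hpre]
        rw [ih rest (c :: cur) acc (by simpa using Nat.lt_of_succ_lt_succ h)]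
        simp [pvSplit, hc]

theorem pvSplitOn_eq (l : List Char) :
    PySem.Chars.splitOn l ['\\'] = (pvSplit l).1 :: (pvSplit l).2 := by
  unfold PySem.Chars.splitOn
  rw [pvSplitOn_go (l.length + 1) l [] [] (Nat.lt_succ_self _)]
  simp

-- the stitched pieces reproduce A's scan
theorem pvKey : ∀ l : List Char, (pvSplit l).1 ++ pvGoB (pvSplit l).2 = pvGoA l
  | [] => by simp [pvSplit, pvGoB, pvGoA]
  | [c] => by
      by_cases h : c = '\\' <;> simp [pvSplit, pvGoB, pvGoA, h]
  | c :: n :: rest => by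
      by_cases hc : c = '\\'
      · subst hc
        by_cases hn : n = '\\'
        · subst hn
          simp [pvSplit, pvGoA, pvGoB, ← pvKey rest]
        · simp [pvSplit, pvGoA, pvGoB, hn, ← pvKey rest]
      · simp [pvSplit, pvGoA, hc, ← pvKey (n :: rest)]

-- ===== VERDICT (by name: the statement is the Claim_ definition above) =====
theorem unescape_text_py_spec : Claim_equal_unescape_text_py := by
  intro text _
  unfold Spec_unescape_text_py unescape_text_py unescape_text_py_alt
  rw [pvSplitOn_eq]
  show String.ofList (pvGoA text.toList)
      = String.ofList ((pvSplit text.toList).1 ++ pvGoB (pvSplit text.toList).2)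
  rw [pvKey]
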